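-- pv_equiv track=rewrite | github.com/Takatakatake/Monato_GlobalVoices_ElPopolaCxinio_Scivolemo_UeaFacila_LiberaFolio | El Popola Ĉinio/parallel_scraper.py | _chunk_urls
-- ===== SOURCE A (Python) =====
-- from typing import Dict, Iterable, List
--
-- def _chunk_urls(urls: List[str], workers: int) -> List[List[str]]:
--     if workers <= 1 or len(urls) <= 1:
--         return [urls]
--     size, remainder = divmod(len(urls), workers)
--     chunks: List[List[str]] = []
--     start = 0
--     for idx in range(workers):
--         extra = 1 if idx < remainder else 0
--         end = start + size + extra
--         chunks.append(urls[start:end])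
--         start = end
--     return [chunk for chunk in chunks if chunk]
-- ===== SOURCE B (Python) =====
-- from typing import Dict, Iterable, List
--
-- def _chunk_urls(urls: List[str], workers: int) -> List[List[str]]:
--     if workers <= 1 or len(urls) <= 1:
--         return [urls]
--     chunks: List[List[str]] = []
--     n = len(urls)
--     i = 0
--     k = workers
--     while i < n and k > 0:
--         c = -(-(n - i) // k)  # ceiling division: size of the next chunk
--         chunks.append(urls[i:i + c])
--         i += c
--         k -= 1
--     return chunks
-- ===== Notes on version B (the rewrite author's own statement) =====
-- stated objective: alternative
-- what changed: B replaces the one-shot divmod size/remainder computation, per-worker index ranges over range(workers) and the final filter of empty chunks by a peeling loop that repeatedly slices off the next ceil(remaining/k) elements and decrements k, stopping when the list is exhausted so empty chunks are never created.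
import Mathlib
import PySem

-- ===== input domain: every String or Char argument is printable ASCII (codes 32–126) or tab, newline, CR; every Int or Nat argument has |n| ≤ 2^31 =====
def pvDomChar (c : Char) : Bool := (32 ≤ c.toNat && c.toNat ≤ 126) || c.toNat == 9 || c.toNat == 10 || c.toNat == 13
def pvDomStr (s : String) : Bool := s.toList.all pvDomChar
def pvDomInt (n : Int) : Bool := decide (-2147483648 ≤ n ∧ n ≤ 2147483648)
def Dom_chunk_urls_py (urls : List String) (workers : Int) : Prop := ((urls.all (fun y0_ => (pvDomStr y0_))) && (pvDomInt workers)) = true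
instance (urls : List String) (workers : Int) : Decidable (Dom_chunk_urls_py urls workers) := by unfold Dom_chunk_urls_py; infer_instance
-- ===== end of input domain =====

-- B replaces divmod + index-range slicing + empty-filter by a peeling loop that repeatedly
-- takes the next ceil(len(rest)/k) elements and decrements k; same cost, different algorithm.

-- ===== PORT A =====
def chunk_urls_py (urls : List String) (workers : Int) : List (List String) :=
  if workers ≤ 1 ∨ (urls.length : Int) ≤ 1 then [urls]
  else
    let n : Int := urls.length
    let size := PySem.Int.floordiv n workers
    let remainder := PySem.Int.mod n workers
    -- 'chunks.append(x)' is encoded as cons onto the accumulator, reversed at the end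
    -- (Python's O(1) append; same chunks in the same order).
    let st := (PySem.List.pyRange 0 workers 1).foldl
      (fun (st : List (List String) × Int) idx =>
        let extra : Int := if idx < remainder then 1 else 0
        let e := st.2 + size + extra
        (PySem.List.slice urls (some st.2) (some e) :: st.1, e))
      ([], 0)
    st.1.reverse.filter (fun c => !c.isEmpty)

-- ===== PORT B =====
-- B's while loop 'while i < n and k > 0' with k decreasing by 1: recursion on k.
-- urls[i:i+c] is PySem slice; i, c stay the Python ints.
def pvPeelB (urls : List String) (n : Int) (k : Nat) (i : Int) : List (List String) :=
  match k with
  | 0 => []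
  | Nat.succ k' =>
    if i < n then
      let c : Int := -(PySem.Int.floordiv (-(n - i)) ((k' : Int) + 1))
      PySem.List.slice urls (some i) (some (i + c)) :: pvPeelB urls n k' (i + c)
    else []

def chunk_urls_py_alt (urls : List String) (workers : Int) : List (List String) :=
  if workers ≤ 1 ∨ (urls.length : Int) ≤ 1 then [urls]
  else pvPeelB urls (urls.length : Int) workers.toNat 0

-- ===== PRECONDITION & SPEC =====
def Spec_chunk_urls_py (urls : List String) (workers : Int) (out : List (List String)) : Prop := out = chunk_urls_py_alt urls workers
instance (urls : List String) (workers : Int) (out : List (List String)) : Decidable (Spec_chunk_urls_py urls workers out) := by unfold Spec_chunk_urls_py; infer_instance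

-- ===== CLAIM (what is proved, stated in full; the proofs are below) =====
def Claim_equal_chunk_urls_py : Prop := ∀ (urls : List String) (workers : Int), Dom_chunk_urls_py urls workers → Spec_chunk_urls_py urls workers (chunk_urls_py urls workers)

-- ===== LEMMAS AND PROOFS =====

-- A reference fold used only in the proofs: consume the list by a table of chunk sizes,
-- skipping zero sizes. Both A's filtered slicing and B's peeling reduce to it.
def pvGB (st : List (List String) × List String) (s : Int) : List (List String) × List String :=
  if s ≠ 0 then (st.1 ++ [st.2.take s.toNat], st.2.drop s.toNat)
  else st

-- The accumulator of the reference fold factors out.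
theorem pvGB_acc (sizes : List Int) (acc : List (List String)) (d : List String) :
    (sizes.foldl pvGB (acc, d)).1 = acc ++ (sizes.foldl pvGB ([], d)).1 := by
  induction sizes generalizing acc d with
  | nil => simp
  | cons s rest ih =>
    simp only [List.foldl_cons, pvGB]
    split_ifs with hs
    · simp only [List.nil_append]
      rw [ih (acc ++ _), ih [_]]
      simp
    · exact ih acc d

-- Folding zero sizes does nothing.
theorem pvGB_zeros (m : Nat) (st : List (List String) × List String) :
    (List.replicate m (0 : Int)).foldl pvGB st = st := by
  induction m generalizing st with
  | zero => rfl
  | succ m ih => simp [List.replicate_succ, pvGB, ih]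

-- Appending folds factor over the accumulator.
theorem pvAppFactor {a b : Type} (g : b -> Int -> a) (h : b -> Int -> b) (l : List Int)
    (acc : List a) (s : b) :
    l.foldl (fun st x => (st.1 ++ [g st.2 x], h st.2 x)) (acc, s)
      = (acc ++ (l.foldl (fun st x => (st.1 ++ [g st.2 x], h st.2 x)) ([], s)).1,
         (l.foldl (fun st x => (st.1 ++ [g st.2 x], h st.2 x)) ([], s)).2) := by
  induction l generalizing acc s with
  | nil => simp
  | cons x t ih =>
    simp only [List.foldl_cons, List.nil_append]
    rw [ih (acc ++ [g s x]), ih [g s x]]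
    simp

-- A cons-accumulating fold is the reverse of the corresponding appending fold.
theorem pvConsRev {a b : Type} (g : b -> Int -> a) (h : b -> Int -> b) (l : List Int)
    (acc : List a) (s : b) :
    l.foldl (fun st x => (g st.2 x :: st.1, h st.2 x)) (acc, s)
      = ((l.foldl (fun st x => (st.1 ++ [g st.2 x], h st.2 x)) ([], s)).1.reverse ++ acc,
         (l.foldl (fun st x => (st.1 ++ [g st.2 x], h st.2 x)) ([], s)).2) := by
  induction l generalizing acc s with
  | nil => simp
  | cons x t ih =>
    simp only [List.foldl_cons, List.nil_append]
    rw [ih (g s x :: acc), pvAppFactor g h t [g s x] (h s x)]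
    simp

-- Core A-side: index slicing at cumulative offsets, filtered of empties,
-- equals the reference sequential take/drop fold that skips zero sizes.
theorem pvMain (urls : List String) (sizes : List Int) (start : Int)
    (acc : List (List String))
    (hstart : 0 ≤ start) (hpos : ∀ s ∈ sizes, 0 ≤ s)
    (hsum : start + sizes.sum ≤ (urls.length : Int)) :
    ((sizes.foldl (fun st s =>
        (st.1 ++ [PySem.List.slice urls (some st.2) (some (st.2 + s))], st.2 + s))
        (acc, start)).1).filter (fun c => !c.isEmpty)
    = acc.filter (fun c => !c.isEmpty)
      ++ (sizes.foldl pvGB ([], urls.drop start.toNat)).1 := by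
  induction sizes generalizing start acc with
  | nil => simp
  | cons s rest ih =>
    have hs : 0 ≤ s := hpos s (by simp)
    have hrest : ∀ x ∈ rest, 0 ≤ x := fun x hx => hpos x (by simp [hx])
    have hrsum : 0 ≤ rest.sum := List.sum_nonneg hrest
    have hse : start + s ≤ (urls.length : Int) := by
      have := hsum; simp [List.sum_cons] at this; omega
    have hslice : PySem.List.slice urls (some start) (some (start + s))
        = (urls.drop start.toNat).take s.toNat := by
      rw [PySem.List.slice_toNat urls hstart (by omega)]
      congr 1; omega
    simp only [List.foldl_cons, List.sum_cons] at hsum ⊢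
    rw [ih (start + s) (acc ++ _) (by omega) hrest (by omega)]
    by_cases hz : s = 0
    · subst hz
      have h0 : PySem.List.slice urls (some start) (some start) = [] := by
        simpa using hslice
      simp [pvGB, List.filter_append, h0]
    · have hs1 : 1 ≤ s := by omega
      have hne : (urls.drop start.toNat).take s.toNat ≠ [] := by
        intro h
        rcases List.take_eq_nil_iff.1 h with h' | h'
        · omega
        · rw [List.drop_eq_nil_iff] at h'; omega
      have hd : (urls.drop start.toNat).drop s.toNat
          = urls.drop (start + s).toNat := by
        rw [List.drop_drop]
        congr 1; omega
      simp only [pvGB, ne_eq, hz, not_false_eq_true, if_true, List.nil_append]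
      rw [hd, pvGB_acc rest [(urls.drop start.toNat).take s.toNat]]
      rw [hslice]
      simp [List.filter_append, hne]

-- The per-index sizes A computes over range(workers) form the explicit size table.
theorem pvSizes (size remainder workers : Int) (h0 : 0 ≤ remainder) (h1 : remainder ≤ workers) :
    (PySem.List.pyRange 0 workers 1).map
        (fun idx => size + if idx < remainder then 1 else 0)
      = List.replicate remainder.toNat (size + 1)
        ++ List.replicate (workers - remainder).toNat size := by
  rw [PySem.List.pyRange_one_append 0 remainder workers h0 h1, List.map_append]
  congr 1
  · rw [List.map_congr_left (g := fun _ => size + 1)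
      (fun x hx => by
        have := (PySem.List.mem_pyRange_one).1 hx
        simp [this.2])]
    rw [List.map_const', PySem.List.length_pyRange_one]
    congr 1; omega
  · rw [List.map_congr_left (g := fun _ => size)
      (fun x hx => by
        have := (PySem.List.mem_pyRange_one).1 hx
        have : ¬ x < remainder := by omega
        simp [this])]
    rw [List.map_const', PySem.List.length_pyRange_one]

-- Core B-side: peeling by ceiling division equals the reference fold over the size table.
theorem pvPeelFold (urls : List String) (k : Nat) (size r i : Int)
    (hs : 0 ≤ size) (hr : 0 ≤ r) (hrk : r ≤ (k : Int)) (hi : 0 ≤ i)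
    (hlen : (urls.length : Int) - i = size * k + r) :
    pvPeelB urls (urls.length : Int) k i
      = ((List.replicate r.toNat (size + 1)
          ++ List.replicate ((k : Int) - r).toNat size).foldl pvGB ([], urls.drop i.toNat)).1 := by
  induction k generalizing size r i with
  | zero =>
    have hr0 : r = 0 := by omega
    subst hr0
    simp [pvPeelB]
  | succ k' ih =>
    have hk : ((k' + 1 : ℕ) : ℤ) = (k' : ℤ) + 1 := by push_cast; ring
    rw [hk] at hrk hlen ⊢
    have hx : size * ((k' : ℤ) + 1) = size * (k' : ℤ) + size := by ring
    rw [hx] at hlen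
    have hnn : 0 ≤ size * (k' : ℤ) := mul_nonneg hs (by positivity)
    set N : Int := (urls.length : Int) with hN
    set w : Int := (k' : Int) + 1 with hw
    have hwpos : (0 : Int) < w := by omega
    by_cases hlt : i < N
    · set c : Int := -(PySem.Int.floordiv (-(N - i)) w) with hc
      simp only [pvPeelB, hlt, if_true]
      rw [← hw, ← hc]
      -- c = size + (1 if r > 0 else 0), by the ceiling-division bracket
      have hcv : c = size + (if 0 < r then 1 else 0) := by
        rw [hc]
        refine (PySem.Int.neg_floordiv_neg_eq_iff_of_pos hwpos).mpr ⟨?_, ?_⟩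
        · rw [hw]; ring_nf; rw [hN] at hlen ⊢; split_ifs with h <;> omega
        · rw [hw]; ring_nf; rw [hN] at hlen ⊢; split_ifs with h <;> omega
      have hc1 : 1 ≤ c := by
        rw [hcv]
        split_ifs with h
        · omega
        · -- r = 0, so size ≥ 1 since N - i ≥ 1
          rcases eq_or_lt_of_le hs with h0 | h0
          · exfalso
            rw [← h0] at hlen
            rw [hN] at hlen
            simp only [zero_mul, add_zero] at hlen
            omega
          · omega
      have hcle : c ≤ N - i := by
        rw [hcv, hN] at *
        split_ifs with h <;> omega
      have hslice : PySem.List.slice urls (some i) (some (i + c))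
          = (urls.drop i.toNat).take c.toNat := by
        rw [PySem.List.slice_toNat urls hi (by omega)]
        congr 1
        omega
      have hdd : (urls.drop i.toNat).drop c.toNat = urls.drop (i + c).toNat := by
        rw [List.drop_drop]
        congr 1
        omega
      by_cases hrpos : 0 < r
      · have hcv1 : c = size + 1 := by rw [hcv, if_pos hrpos]
        have ihh := ih size (r - 1) (i + c) hs (by omega) (by omega) (by omega)
          (by rw [← hN] at *; omega)
        have hsplit : List.replicate r.toNat (size + 1)
            ++ List.replicate (((k' : Int) + 1) - r).toNat size
            = (size + 1) :: (List.replicate (r - 1).toNat (size + 1)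
              ++ List.replicate ((k' : Int) - (r - 1)).toNat size) := by
          have h3 : r.toNat = (r - 1).toNat + 1 := by omega
          rw [h3, List.replicate_succ]
          have h4 : ((k' : Int) + 1) - r = (k' : Int) - (r - 1) := by ring
          rw [h4]
          simp
        rw [hsplit, List.foldl_cons]
        have hne : size + 1 ≠ 0 := by omega
        simp only [pvGB, ne_eq, hne, not_false_eq_true, if_true, List.nil_append]
        rw [pvGB_acc, ihh, ← hcv1, hdd, hslice]
        simp
      · have hr0 : r = 0 := by omega
        subst hr0
        have hcv1 : c = size := by rw [hcv]; simp
        have ihh := ih size 0 (i + c) hs le_rfl (by positivity) (by omega)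
          (by rw [← hN] at *; omega)
        have hsplit : List.replicate (0 : Int).toNat (size + 1)
            ++ List.replicate (((k' : Int) + 1) - 0).toNat size
            = size :: (List.replicate (0 : Int).toNat (size + 1)
              ++ List.replicate ((k' : Int) - 0).toNat size) := by
          have h3 : (((k' : Int) + 1) - 0).toNat = ((k' : Int) - 0).toNat + 1 := by omega
          rw [h3, List.replicate_succ]
          simp
        rw [hsplit, List.foldl_cons]
        have hne : size ≠ 0 := by omega
        simp only [pvGB, ne_eq, hne, not_false_eq_true, if_true, List.nil_append]
        rw [pvGB_acc, ihh, ← hcv1, hdd, hslice]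
        simp
    · -- i ≥ N: the remaining length is ≤ 0, so size = r = 0 and both sides are empty
      have h1 : size = 0 := by rw [hN] at hlen; omega
      have h2 : r = 0 := by rw [hN] at hlen; omega
      subst h1; subst h2
      simp only [pvPeelB, hlt, if_false, Int.toNat_zero, List.replicate_zero,
        List.nil_append, sub_zero]
      rw [pvGB_zeros]

-- ===== VERDICT (by name: the statement is the Claim_ definition above) =====
theorem chunk_urls_py_spec : Claim_equal_chunk_urls_py := by
  intro urls workers _
  unfold Spec_chunk_urls_py chunk_urls_py chunk_urls_py_alt
  by_cases hg : workers ≤ 1 ∨ (urls.length : Int) ≤ 1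
  · rw [if_pos hg, if_pos hg]
  · rw [if_neg hg, if_neg hg]
    dsimp only []
    rw [pvConsRev (fun st2 idx => PySem.List.slice urls (some st2)
          (some (st2 + (PySem.Int.floordiv (urls.length : Int) workers) +
            if idx < PySem.Int.mod (urls.length : Int) workers then 1 else 0)))
        (fun st2 idx => st2 + (PySem.Int.floordiv (urls.length : Int) workers) +
            if idx < PySem.Int.mod (urls.length : Int) workers then 1 else 0)
        (PySem.List.pyRange 0 workers 1) [] 0]
    simp only [List.append_nil, List.reverse_reverse]
    push Not at hg
    obtain ⟨hw, hn⟩ := hg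
    set n : Int := (urls.length : Int) with hn_def
    set size := PySem.Int.floordiv n workers with hsize
    set remainder := PySem.Int.mod n workers with hrem
    have hwpos : 0 < workers := by omega
    have hr0 : 0 ≤ remainder := PySem.Int.mod_nonneg n hwpos
    have hr1 : remainder < workers := PySem.Int.mod_lt n hwpos
    have hdm : size * workers + remainder = n := PySem.Int.floordiv_mul_add_mod n workers
    have hsz0 : 0 ≤ size := by
      exact (PySem.Int.le_floordiv_iff_mul_le (a := n) (b := workers) (q := 0) hwpos).2
        (by simp; omega)
    have hfoldA :
        (PySem.List.pyRange 0 workers 1).foldl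
          (fun (st : List (List String) × Int) idx =>
            (st.1 ++ [PySem.List.slice urls (some st.2)
              (some (st.2 + size + if idx < remainder then 1 else 0))],
             st.2 + size + if idx < remainder then 1 else 0))
          ([], 0)
        = ((PySem.List.pyRange 0 workers 1).map
            (fun idx => size + if idx < remainder then 1 else 0)).foldl
          (fun (st : List (List String) × Int) s =>
            (st.1 ++ [PySem.List.slice urls (some st.2) (some (st.2 + s))], st.2 + s))
          ([], 0) := by
      rw [List.foldl_map]
      congr 1; funext st s; simp [add_assoc]
    have hpos : ∀ s ∈ List.replicate remainder.toNat (size + 1)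
        ++ List.replicate (workers - remainder).toNat size, 0 ≤ s := by
      intro s hs
      rcases List.mem_append.1 hs with h | h
      · rw [List.eq_of_mem_replicate h]; omega
      · rw [List.eq_of_mem_replicate h]; omega
    have hsum : (List.replicate remainder.toNat (size + 1)
        ++ List.replicate (workers - remainder).toNat size).sum = n := by
      rw [List.sum_append, List.sum_replicate, List.sum_replicate,
        nsmul_eq_mul, nsmul_eq_mul,
        Int.toNat_of_nonneg hr0, Int.toNat_of_nonneg (by omega : (0:Int) ≤ workers - remainder)]
      linear_combination hdm
    have hmain := pvMain urls (List.replicate remainder.toNat (size + 1)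
        ++ List.replicate (workers - remainder).toNat size) 0 [] le_rfl hpos
      (by rw [hsum]; omega)
    simp only [List.drop_zero, Int.toNat_zero, List.filter_nil, List.nil_append] at hmain
    have hpeel := pvPeelFold urls workers.toNat size remainder 0 hsz0 hr0
      (by rw [Int.toNat_of_nonneg (le_of_lt hwpos)]; omega) le_rfl
      (by rw [Int.toNat_of_nonneg (le_of_lt hwpos)]; omega)
    simp only [Int.toNat_zero, List.drop_zero] at hpeel
    rw [hfoldA, pvSizes size remainder workers hr0 (le_of_lt hr1), hmain, hpeel,
      Int.toNat_of_nonneg (le_of_lt hwpos)]
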